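-- pv_equiv track=rewrite | github.com/xenotropic/spoken-wikipedia-rss | generatepod.py | wiki_parser
-- ===== SOURCE A (Python) =====
-- def wiki_parser(text):
--
-- # split into headings and body text
--     headings = []
--     body_texts = []
--     body = ""
--     first = True
--     lines = text.split('\n')
--     for line in lines:
--         if line.startswith('=='):
--             headings.append(line)
--             if ( not first ):
--                 body_texts.append(body)
--                 body = ""
--             first = False
--         else:
--               body += line
--     body_texts.append(body)
-- # create the dict
--     wiki_dict = {}
--     for h, b in zip(headings, body_texts):
--         wiki_dict[h] = b
--
-- # return the dict
--     return wiki_dict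
-- ===== SOURCE B (Python) =====
-- def wiki_parser(text):
--     # Reverse scan: walk the lines back-to-front, collecting each heading with the
--     # body text that follows it; the leftover buffer at the end is the text before
--     # the first heading, which gets prepended to the first heading's body.
--     pairs = []
--     body = ""
--     for line in reversed(text.split('\n')):
--         if line.startswith('=='):
--             pairs.append((line, body))
--             body = ""
--         else:
--             body = line + body
--     pairs.reverse()
--     if pairs:
--         h0, b0 = pairs[0]
--         pairs[0] = (h0, body + b0)
--     return dict(pairs)
-- ===== Notes on version B (the rewrite author's own statement) =====
-- stated objective: alternative
-- what changed: Replaces A's forward two-phase parse (parallel headings/body_texts lists with a 'first' flag, then a zip loop) by a backwards scan over the reversed line list that pairs each heading with the body text accumulated after it, then reverses the pair list, prepends the leftover pre-heading text to the first pair and builds the dict from the pairs.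
import Mathlib
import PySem

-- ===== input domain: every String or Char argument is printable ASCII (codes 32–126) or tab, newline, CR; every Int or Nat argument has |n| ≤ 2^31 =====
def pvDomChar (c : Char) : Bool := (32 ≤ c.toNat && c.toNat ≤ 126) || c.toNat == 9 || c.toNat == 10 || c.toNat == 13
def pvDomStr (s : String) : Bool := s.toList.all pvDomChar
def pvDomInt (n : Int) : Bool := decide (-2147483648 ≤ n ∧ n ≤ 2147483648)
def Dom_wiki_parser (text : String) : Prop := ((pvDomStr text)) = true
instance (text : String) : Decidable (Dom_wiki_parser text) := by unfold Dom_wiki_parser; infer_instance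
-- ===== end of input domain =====

-- B scans the reversed line list, pairing each heading with the body text after it,
-- then reverses the pairs, prepends the leftover pre-heading text to the first pair
-- and builds the dict from the pairs; A's forward parse with parallel lists is dropped.

-- ===== PORT A =====
-- loop state: (headings, body_texts, body, first)
def wikiStepA (s : List String × List String × String × Bool) (line : String) :
    List String × List String × String × Bool :=
  match s with
  | (headings, body_texts, body, first) =>
    if PySem.Str.startswith line "==" then
      if !first then (headings ++ [line], body_texts ++ [body], "", false)
      else (headings ++ [line], body_texts, body, false)
    else (headings, body_texts, body ++ line, first)

def wiki_parser (text : String) : List (String × String) :=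
  let lines := ((PySem.Str.split? text "\n").getD [])
  match lines.foldl wikiStepA ([], [], "", true) with
  | (headings, body_texts, body, _) =>
    let body_texts := body_texts ++ [body]
    ((headings.zip body_texts).foldl
      (fun (d : PySem.Dict String String) hb => d.insert hb.1 hb.2)
      PySem.Dict.empty).items

-- ===== PORT B =====
-- loop state: (pairs, body); Source B iterates reversed(lines), ported as lines.reverse
def wikiStepB (s : List (String × String) × String) (line : String) :
    List (String × String) × String :=
  match s with
  | (pairs, body) =>
    if PySem.Str.startswith line "==" then
      (pairs ++ [(line, body)], "")
    else
      (pairs, line ++ body)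

def wiki_parser_alt (text : String) : List (String × String) :=
  match (((PySem.Str.split? text "\n").getD [])).reverse.foldl wikiStepB ([], "") with
  | (pairsRev, body) =>
    match pairsRev.reverse with
    | [] => (PySem.Dict.empty : PySem.Dict String String).items
    | (h0, b0) :: rest =>
      (((h0, body ++ b0) :: rest).foldl
        (fun (d : PySem.Dict String String) hb => d.insert hb.1 hb.2)
        PySem.Dict.empty).items

-- ===== PRECONDITION & SPEC =====
def Spec_wiki_parser (text : String) (out : List (String × String)) : Prop := out = wiki_parser_alt text
instance (text : String) (out : List (String × String)) : Decidable (Spec_wiki_parser text out) := by unfold Spec_wiki_parser; infer_instance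

-- ===== CLAIM (what is proved, stated in full; the proofs are below) =====
def Claim_equal_wiki_parser : Prop := ∀ (text : String), Dom_wiki_parser text → Spec_wiki_parser text (wiki_parser text)

-- ===== LEMMAS AND PROOFS =====

def wikiIns : PySem.Dict String String → String × String → PySem.Dict String String :=
  fun d hb => d.insert hb.1 hb.2

-- common spec: (pairs from the first heading on, concatenation of the leading non-heading lines)
def wikiSegs : List String → List (String × String) × String
  | [] => ([], "")
  | line :: rest =>
    let s := wikiSegs rest
    if PySem.Str.startswith line "==" then ((line, s.2) :: s.1, "")
    else (s.1, line ++ s.2)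

def wikiFinA (s : List String × List String × String × Bool) : List (String × String) :=
  ((s.1.zip (s.2.1 ++ [s.2.2.1])).foldl wikiIns PySem.Dict.empty).items

def wikiFinTop (body : String) (s : List (String × String) × String) : List (String × String) :=
  match s.1 with
  | [] => []
  | (h, b) :: rest => (((h, body ++ s.2 ++ b) :: rest).foldl wikiIns PySem.Dict.empty).items

lemma wiki_loop_some (lines : List String) :
    ∀ (hs : List String) (h : String) (bts : List String) (body : String),
      bts.length = hs.length →
      wikiFinA (lines.foldl wikiStepA (hs ++ [h], bts, body, false))
        = ((hs.zip bts ++ ((h, body ++ (wikiSegs lines).2) :: (wikiSegs lines).1)).foldl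
            wikiIns PySem.Dict.empty).items := by
  induction lines with
  | nil =>
    intro hs h bts body hlen
    simp only [List.foldl_nil, wikiFinA, wikiSegs]
    rw [List.zip_append hlen.symm]
    simp
  | cons line rest ih =>
    intro hs h bts body hlen
    simp only [List.foldl_cons, wikiStepA, wikiSegs]
    by_cases hsw : PySem.Str.startswith line "==" = true
    · simp only [hsw, if_pos, Bool.not_false]
      have hlen' : (bts ++ [body]).length = (hs ++ [h]).length := by simp [hlen]
      have := ih (hs ++ [h]) line (bts ++ [body]) "" hlen'
      rw [List.zip_append (by simp [hlen])] at this
      simpa [List.append_assoc] using this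
    · simp only [hsw, if_false, Bool.false_eq_true]
      rw [ih hs h bts (body ++ line) hlen]
      simp [String.append_assoc]

lemma wiki_loop_top (lines : List String) :
    ∀ (body : String),
      wikiFinA (lines.foldl wikiStepA ([], [], body, true))
        = wikiFinTop body (wikiSegs lines) := by
  induction lines with
  | nil =>
    intro body
    simp only [List.foldl_nil, wikiFinA, wikiFinTop, wikiSegs, List.zip_nil_left, List.foldl_nil]
    rfl
  | cons line rest ih =>
    intro body
    simp only [List.foldl_cons, wikiStepA, wikiSegs]
    by_cases hsw : PySem.Str.startswith line "==" = true
    · simp only [hsw, if_pos, Bool.not_true, Bool.false_eq_true, if_false, List.nil_append]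
      have := wiki_loop_some rest [] line [] body rfl
      simp only [List.nil_append, List.zip_nil_left] at this
      rw [this]
      simp [wikiFinTop]
    · simp only [hsw, if_false, Bool.false_eq_true]
      rw [ih (body ++ line)]
      rcases hseg : wikiSegs rest with ⟨ps, pre⟩
      cases ps with
      | nil => simp [wikiFinTop]
      | cons p rest' => simp [wikiFinTop, String.append_assoc]

lemma wiki_foldr_B (lines : List String) :
    lines.foldr (fun line s => wikiStepB s line) ([], "")
      = ((wikiSegs lines).1.reverse, (wikiSegs lines).2) := by
  induction lines with
  | nil => rfl
  | cons line rest ih =>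
    rw [List.foldr_cons, ih]
    simp only [wikiStepB, wikiSegs]
    by_cases hsw : PySem.Str.startswith line "==" = true
    · simp only [hsw, if_pos]
      simp
    · simp only [hsw, Bool.false_eq_true, if_false]

-- ===== VERDICT (by name: the statement is the Claim_ definition above) =====
theorem wiki_parser_spec : Claim_equal_wiki_parser := by
  intro text _
  unfold Spec_wiki_parser
  simp only [wiki_parser, wiki_parser_alt]
  have hA := wiki_loop_top ((PySem.Str.split? text "\n").getD []) ""
  rcases h1 : ((PySem.Str.split? text "\n").getD []).foldl wikiStepA ([], [], "", true) with
    ⟨hs, bts, body, fl⟩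
  rw [h1] at hA
  rw [List.foldl_reverse, wiki_foldr_B]
  rcases hseg : wikiSegs ((PySem.Str.split? text "\n").getD []) with ⟨ps, pre⟩
  rw [hseg] at hA
  simp only [wikiFinA, wikiFinTop] at hA
  simp only [List.reverse_reverse]
  cases ps with
  | nil => simpa using hA
  | cons p rest' => simpa using hA
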